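-- pv_equiv track=rewrite | github.com/YinDFY/CodeAudit | QTApplication/MainWindow.py | highlight_str
-- ===== SOURCE A (Python) =====
-- def highlight_str(content, row, column, length):
--     lines = content.split('\n')
--     highlighted_lines = []
--     for i, line in enumerate(lines, start=1):
--         if i == row:
--             highlighted_line = ""
--             for j, char in enumerate(line, start=1):
--                 if column <= j < column + length:
--                     highlighted_line += f"<span class='highlight' style='background-color: red;'>{char}</span>"
--                 else:
--                     highlighted_line += char
--             highlighted_lines.append(highlighted_line)
--         else:
--             highlighted_lines.append(line)
--     highlighted_content = "<pre>" + "\n".join(highlighted_lines) + "</pre>"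
--     return highlighted_content
-- ===== SOURCE B (Python) =====
-- SPAN = "<span class='highlight' style='background-color: red;'>{}</span>"
--
-- def highlight_str(content, row, column, length):
--     lines = content.split('\n')
--     if 1 <= row <= len(lines):
--         line = lines[row - 1]
--         start = max(0, column - 1)
--         end = max(start, column + length - 1)
--         lines[row - 1] = (line[:start]
--                           + ''.join(SPAN.format(c) for c in line[start:end])
--                           + line[end:])
--     return "<pre>" + '\n'.join(lines) + "</pre>"
-- ===== Notes on version B (the rewrite author's own statement) =====
-- stated objective: simpler
-- what changed: A tests every character of every line against the column window inside nested loops; B locates the target line by index, computes the clamped highlight range once, and rebuilds only that line by slicing (prefix + wrapped middle + suffix), leaving all other lines untouched.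
import Mathlib
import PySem

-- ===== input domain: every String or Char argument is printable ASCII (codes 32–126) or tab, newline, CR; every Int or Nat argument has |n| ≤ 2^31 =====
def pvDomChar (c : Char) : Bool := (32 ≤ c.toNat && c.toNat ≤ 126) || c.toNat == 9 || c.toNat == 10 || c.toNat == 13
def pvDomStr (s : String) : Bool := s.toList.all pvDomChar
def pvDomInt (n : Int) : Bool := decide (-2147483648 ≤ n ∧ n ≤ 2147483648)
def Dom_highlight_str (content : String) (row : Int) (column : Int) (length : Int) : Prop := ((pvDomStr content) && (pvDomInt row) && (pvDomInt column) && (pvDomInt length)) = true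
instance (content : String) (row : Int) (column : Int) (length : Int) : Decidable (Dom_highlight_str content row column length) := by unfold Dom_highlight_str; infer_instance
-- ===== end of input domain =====

-- B rebuilds only the target line by clamped slicing instead of A's per-character
-- position test over every line (objective: simpler; same return value everywhere).

-- the HTML wrapper both Pythons produce for one highlighted character
def pvSpan (c : Char) : List Char :=
  "<span class='highlight' style='background-color: red;'>".toList ++ [c] ++ "</span>".toList

-- ===== PORT A =====
-- inner loop: for j, char in enumerate(line, start=1): … (accumulated left to right)
def hlA_go (column length j : Int) : List Char → List Char
  | [] => []
  | c :: rest =>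
      (if column ≤ j ∧ j < column + length then pvSpan c else [c]) ++ hlA_go column length (j + 1) rest

-- outer loop: for i, line in enumerate(lines, start=1): append highlighted or unchanged line
def hlA_lines (row column length i : Int) : List (List Char) → List (List Char)
  | [] => []
  | l :: rest =>
      (if i = row then hlA_go column length 1 l else l) :: hlA_lines row column length (i + 1) rest

def highlight_str (content : String) (row : Int) (column : Int) (length : Int) : String :=
  let lines := PySem.Chars.splitOn content.toList ['\n']
  let highlighted := hlA_lines row column length 1 lines
  String.ofList ("<pre>".toList ++ PySem.Chars.join ['\n'] highlighted ++ "</pre>".toList)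

-- ===== PORT B =====
def highlight_str_alt (content : String) (row : Int) (column : Int) (length : Int) : String :=
  let lines := PySem.Chars.splitOn content.toList ['\n']
  let lines' :=
    if 1 ≤ row ∧ row ≤ (lines.length : Int) then
      let line := lines.getD (row - 1).toNat []
      let start := max 0 (column - 1)
      let stop := max start (column + length - 1)
      lines.set (row - 1).toNat
        (PySem.List.slice line none (some start)
          ++ (PySem.List.slice line (some start) (some stop)).flatMap pvSpan
          ++ PySem.List.slice line (some stop) none)
    else lines
  String.ofList ("<pre>".toList ++ PySem.Chars.join ['\n'] lines' ++ "</pre>".toList)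

-- ===== PRECONDITION & SPEC =====
def Spec_highlight_str (content : String) (row : Int) (column : Int) (length : Int) (out : String) : Prop := out = highlight_str_alt content row column length
instance (content : String) (row : Int) (column : Int) (length : Int) (out : String) : Decidable (Spec_highlight_str content row column length out) := by unfold Spec_highlight_str; infer_instance

-- ===== CLAIM (what is proved, stated in full; the proofs are below) =====
def Claim_equal_highlight_str : Prop := ∀ (content : String) (row : Int) (column : Int) (length : Int), Dom_highlight_str content row column length → Spec_highlight_str content row column length (highlight_str content row column length)

-- ===== LEMMAS AND PROOFS =====

-- A's character loop from counter j equals prefix ++ wrapped middle ++ suffix for the clamped window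
theorem hlA_go_eq (cs : List Char) : ∀ (column length j : Int) (s e : Nat),
    (s : Int) = max 0 (column - j) →
    (e : Int) = max (max 0 (column - j)) (column + length - j) →
    hlA_go column length j cs
      = cs.take s ++ ((cs.drop s).take (e - s)).flatMap pvSpan ++ cs.drop e := by
  induction cs with
  | nil => intro column length j s e hs he; simp [hlA_go]
  | cons c rest ih =>
    intro column length j s e hs he
    by_cases hc : column ≤ j ∧ j < column + length
    · -- this char is highlighted: s = 0, e ≥ 1
      have hs0 : s = 0 := by omega
      obtain ⟨k, rfl⟩ : ∃ k, e = k + 1 := ⟨e - 1, by omega⟩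
      have := ih column length (j + 1) 0 k (by omega) (by omega)
      simp [hlA_go, hc, hs0, this, List.flatMap_cons]
    · -- this char is copied verbatim
      have step := ih column length (j + 1) (s - 1) (e - 1) (by omega) (by omega)
      rcases Nat.eq_zero_or_pos s with hs0 | hspos
      · -- window starts at or before here but has already ended (or is empty): e = 0
        have he0 : e = 0 := by omega
        simp [hlA_go, hc, hs0, he0] at step ⊢
        simp [step]
      · -- window strictly ahead: s ≥ 1, e ≥ 1
        obtain ⟨s', rfl⟩ : ∃ s', s = s' + 1 := ⟨s - 1, by omega⟩
        obtain ⟨e', rfl⟩ : ∃ e', e = e' + 1 := ⟨e - 1, by omega⟩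
        simp only [Nat.add_sub_cancel] at step
        simp [hlA_go, hc, step, List.take_succ_cons, List.drop_succ_cons]

-- A's line loop equals "replace the row-th line if in range, else leave the list alone"
theorem hlA_lines_eq (ls : List (List Char)) : ∀ (row column length i : Int),
    hlA_lines row column length i ls
      = if i ≤ row ∧ row < i + (ls.length : Int) then
          ls.set (row - i).toNat (hlA_go column length 1 (ls.getD (row - i).toNat []))
        else ls := by
  induction ls with
  | nil => intro row column length i; simp [hlA_lines]
  | cons l rest ih =>
    intro row column length i
    simp only [hlA_lines, ih]
    by_cases hir : i = row
    · subst hir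
      have hcl : i ≤ i ∧ i < i + ((l :: rest).length : Int) := by
        push_cast [List.length_cons]; omega
      rw [if_pos rfl, if_neg (show ¬(i + 1 ≤ i ∧ i < i + 1 + (rest.length : Int)) from by omega),
          if_pos hcl, show (i - i).toNat = 0 from by omega]
      simp
    · by_cases hc : i + 1 ≤ row ∧ row < i + 1 + (rest.length : Int)
      · have hcl : i ≤ row ∧ row < i + ((l :: rest).length : Int) := by
          push_cast [List.length_cons]; omega
        rw [if_neg hir, if_pos hc, if_pos hcl]
        obtain ⟨k, hk⟩ : ∃ k, (row - i).toNat = k + 1 := ⟨(row - (i + 1)).toNat, by omega⟩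
        rw [hk, show (row - (i + 1)).toNat = k from by omega]
        simp
      · have hcl : ¬(i ≤ row ∧ row < i + ((l :: rest).length : Int)) := by
          push_cast [List.length_cons]; omega
        rw [if_neg hir, if_neg hc, if_neg hcl]

-- bridge: A's loop result over the split lines IS B's slice-based replacement
theorem lines_bridge (ls : List (List Char)) (row column length : Int) :
    hlA_lines row column length 1 ls
      = if 1 ≤ row ∧ row ≤ (ls.length : Int) then
          ls.set (row - 1).toNat
            (PySem.List.slice (ls.getD (row - 1).toNat []) none (some (max 0 (column - 1)))
              ++ (PySem.List.slice (ls.getD (row - 1).toNat []) (some (max 0 (column - 1)))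
                    (some (max (max 0 (column - 1)) (column + length - 1)))).flatMap pvSpan
              ++ PySem.List.slice (ls.getD (row - 1).toNat [])
                    (some (max (max 0 (column - 1)) (column + length - 1))) none)
        else ls := by
  rw [hlA_lines_eq]
  by_cases hcond : 1 ≤ row ∧ row ≤ (ls.length : Int)
  · rw [if_pos (⟨hcond.1, by omega⟩ : 1 ≤ row ∧ row < 1 + (ls.length : Int)), if_pos hcond]
    congr 1
    rw [hlA_go_eq _ column length 1 (max 0 (column - 1)).toNat
          (max (max 0 (column - 1)) (column + length - 1)).toNat (by omega) (by omega)]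
    rw [PySem.List.slice_to _ (by omega),
        PySem.List.slice_toNat _ (by omega) (by omega),
        PySem.List.slice_from _ (by omega)]
  · rw [if_neg (fun h => hcond ⟨h.1, by omega⟩), if_neg hcond]

-- ===== VERDICT (by name: the statement is the Claim_ definition above) =====
theorem highlight_str_spec : Claim_equal_highlight_str := by
  intro content row column length _
  unfold Spec_highlight_str highlight_str highlight_str_alt
  dsimp only
  rw [lines_bridge]
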